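-- pv_equiv track=rewrite | github.com/zxgx/ccks20-dev | src/train_ner.py | restore_entities
-- ===== SOURCE A (Python) =====
-- def restore_entities(pred, question):
--     # 注意：shuffle后，pred与questions顺序不同
--     all_entities = []
--     for i in range(len(pred)):
--         entities = []
--         str = ''
--         labels = pred[i][1:-1] # cls & sep
--         for j in range(min(len(labels), len(question))):
--             if labels[j] == 1:
--                 str += question[i][j]
--             else:
--                 if len(str):
--                     entities.append(str)
--                     str = ''
--         if len(str):
--             entities.append(str)
--         all_entities.append(entities)
--     return all_entities
-- ===== SOURCE B (Python) =====
-- def restore_entities(pred, question):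
--     all_entities = []
--     for i, p in enumerate(pred):
--         labels = p[1:-1]  # cls & sep
--         n = min(len(labels), len(question))
--         entities = []
--         start = 0
--         while start < n:
--             end = start
--             while end < n and labels[end] == labels[start]:
--                 end += 1
--             if labels[start] == 1:
--                 ent = ''.join(question[i][start:end])
--                 if ent:
--                     entities.append(ent)
--             start = end
--         all_entities.append(entities)
--     return all_entities
-- ===== Notes on version B (the rewrite author's own statement) =====
-- stated objective: alternative
-- what changed: Replaces A's per-index scan with a mutable string accumulator and flush-on-boundary logic by a two-pointer run decomposition: find each maximal run of equal labels, and for a 1-run join the corresponding question slice in one step.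
import Mathlib
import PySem

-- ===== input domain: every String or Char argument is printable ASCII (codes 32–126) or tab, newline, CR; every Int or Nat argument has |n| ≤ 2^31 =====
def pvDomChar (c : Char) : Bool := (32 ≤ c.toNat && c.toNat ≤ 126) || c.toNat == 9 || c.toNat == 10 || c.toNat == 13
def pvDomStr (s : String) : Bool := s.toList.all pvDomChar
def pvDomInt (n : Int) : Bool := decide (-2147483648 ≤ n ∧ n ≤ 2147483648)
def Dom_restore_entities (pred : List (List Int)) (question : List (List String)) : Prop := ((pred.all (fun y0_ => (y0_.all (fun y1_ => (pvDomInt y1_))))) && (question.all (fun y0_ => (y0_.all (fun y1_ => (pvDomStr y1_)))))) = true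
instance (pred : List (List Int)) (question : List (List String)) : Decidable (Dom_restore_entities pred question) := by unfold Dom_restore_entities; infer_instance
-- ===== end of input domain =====

-- B replaces A's per-index scan with a string accumulator and flush-on-boundary logic by a
-- two-pointer run decomposition (maximal equal-label runs, joining the question slice of each
-- 1-run in one step): a genuinely different decomposition, same cost (objective: alternative).

-- ===== PORT A =====
-- Literal port of A: outer loop over range(len(pred)); inner loop over range(min(len(labels),
-- len(question))) carrying (entities, str); the truthiness test 'if len(str)' ported as str ≠ "".
def restore_entities (pred : List (List Int)) (question : List (List String)) : List (List String) :=
  (PySem.List.pyRange 0 (pred.length : Int) 1).foldl (fun all_entities i =>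
    let labels := PySem.List.slice (PySem.List.pyGetD pred i []) (some 1) (some (-1))
    let st := (PySem.List.pyRange 0 ((min labels.length question.length : Nat) : Int) 1).foldl
      (fun (st : List String × String) j =>
        if PySem.List.pyGetD labels j 0 = 1 then
          (st.1, st.2 ++ PySem.List.pyGetD (PySem.List.pyGetD question i []) j "")
        else if st.2 ≠ "" then (st.1 ++ [st.2], "") else st)
      ([], "")
    let entities := if st.2 ≠ "" then st.1 ++ [st.2] else st.1
    all_entities ++ [entities]) []

-- ===== PORT B =====
-- B-side helper: the inner 'while end < n and labels[end] == labels[start]' loop of Source B —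
-- the end (bounded by n) of the maximal run of label v starting at e.
def runEnd (labels : List Int) (n : Nat) (v : Int) (e : Nat) : Nat :=
  if _h : e < n ∧ labels.getD e 0 = v then runEnd labels n v (e + 1) else e
termination_by n - e
decreasing_by omega

-- needed by bLoop's termination argument (cited in its decreasing_by)
theorem runEnd_ge (labels : List Int) (n : Nat) (v : Int) (e : Nat) : e ≤ runEnd labels n v e := by
  rw [runEnd]
  split
  · have := runEnd_ge labels n v (e + 1)
    omega
  · exact Nat.le_refl e
termination_by n - e
decreasing_by rename_i h; omega

-- B-side helper: the outer 'while start < n' loop of Source B, producing one entity list;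
-- ''.join(question[i][start:end]) is PySem.Str.join, 'if ent:' is the truthiness test ent ≠ "".
def bLoop (labels : List Int) (qi : List String) (n : Nat) (start : Nat) : List String :=
  if h : start < n then
    let e := runEnd labels n (labels.getD start 0) start
    let rest := bLoop labels qi n e
    if labels.getD start 0 = 1 then
      let ent := PySem.Str.join "" (PySem.List.slice qi (some (start : Int)) (some (e : Int)))
      if ent ≠ "" then ent :: rest else rest
    else rest
  else []
termination_by n - start
decreasing_by
  have h1 : start + 1 ≤ runEnd labels n (labels.getD start 0) start := by
    rw [runEnd]; rw [dif_pos ⟨h, rfl⟩]; exact runEnd_ge labels n _ (start + 1)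
  omega

def restore_entities_alt (pred : List (List Int)) (question : List (List String)) : List (List String) :=
  (PySem.List.enumerate pred).map (fun ip =>
    let labels := PySem.List.slice ip.2 (some 1) (some (-1))
    bLoop labels (PySem.List.pyGetD question ip.1 []) (min labels.length question.length) 0)

-- ===== PRECONDITION & SPEC =====
-- Pre_ excludes exactly the inputs on which A raises IndexError: some scanned inner position j
-- with a 1-label whose character question[i][j] (or the row question[i] itself) does not exist.
def Pre_restore_entities (pred : List (List Int)) (question : List (List String)) : Prop :=
  ∀ i < pred.length, ∀ j < min (PySem.List.slice (pred.getD i []) (some 1) (some (-1))).length question.length,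
    (PySem.List.slice (pred.getD i []) (some 1) (some (-1))).getD j 0 = 1 →
      i < question.length ∧ j < (question.getD i []).length
instance (pred : List (List Int)) (question : List (List String)) : Decidable (Pre_restore_entities pred question) := by unfold Pre_restore_entities; infer_instance

def pvWitness_restore_entities : List (List Int) × List (List String) :=
  ([[0, 1, 0], [5, 1, 1, 5]], [["ab", "cd"], ["x", "y"]])

def Spec_restore_entities (pred : List (List Int)) (question : List (List String)) (out : List (List String)) : Prop := out = restore_entities_alt pred question
instance (pred : List (List Int)) (question : List (List String)) (out : List (List String)) : Decidable (Spec_restore_entities pred question out) := by unfold Spec_restore_entities; infer_instance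

-- ===== CLAIM (what is proved, stated in full; the proofs are below) =====
def Claim_equal_restore_entities : Prop := ∀ (pred : List (List Int)) (question : List (List String)), Dom_restore_entities pred question → Pre_restore_entities pred question → Spec_restore_entities pred question (restore_entities pred question)

-- ===== LEMMAS AND PROOFS =====

-- A's inner step and final flush over Nat indices (proof-side normal forms of A's inner loop)
def stepN (labels : List Int) (qi : List String) (st : List String × String) (j : Nat) : List String × String :=
  if labels.getD j 0 = 1 then (st.1, st.2 ++ qi.getD j "")
  else if st.2 ≠ "" then (st.1 ++ [st.2], "") else st

def flushSt (st : List String × String) : List String :=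
  if st.2 ≠ "" then st.1 ++ [st.2] else st.1

def catSeg (qi : List String) : Nat → Nat → String
  | _, 0 => ""
  | s, m + 1 => qi.getD s "" ++ catSeg qi (s + 1) m

theorem flatten_intersperse_nil {α : Type} (l : List (List α)) :
    (List.intersperse ([] : List α) l).flatten = l.flatten := by
  induction l with
  | nil => rfl
  | cons a t ih =>
    cases t with
    | nil => rfl
    | cons b t' => simp [List.intersperse] at ih ⊢; simpa using ih

theorem join_empty_cons (a : String) (l : List String) :
    PySem.Str.join "" (a :: l) = a ++ PySem.Str.join "" l := by
  apply String.toList_inj.mp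
  simp [PySem.Str.join, PySem.Chars.join, List.intercalate, String.toList_append,
    String.toList_ofList, flatten_intersperse_nil]

theorem join_empty_nil : PySem.Str.join "" ([] : List String) = "" := by
  apply String.toList_inj.mp
  simp [PySem.Str.join, PySem.Chars.join, List.intercalate]

theorem catSeg_eq_join (qi : List String) (m : Nat) : ∀ s,
    catSeg qi s m = PySem.Str.join "" ((qi.drop s).take m) := by
  induction m with
  | zero => intro s; simp [catSeg, join_empty_nil]
  | succ m ih =>
    intro s
    by_cases hs : s < qi.length
    · rw [List.drop_eq_getElem_cons hs, List.take_succ_cons, join_empty_cons]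
      simp [catSeg, ih (s + 1), List.getElem?_eq_getElem hs]
    · have hd : qi.drop s = [] := by
        apply List.drop_eq_nil_of_le; omega
      have hd' : qi.drop (s + 1) = [] := by
        apply List.drop_eq_nil_of_le; omega
      simp [catSeg, ih (s + 1), hd, hd', join_empty_nil, List.getD_eq_getElem?_getD,
        List.getElem?_eq_none (by omega : qi.length ≤ s)]

theorem step_flush (labels : List Int) (qi : List String) (ents : List String) (str : String)
    (j : Nat) (hj : labels.getD j 0 ≠ 1) :
    stepN labels qi (ents, str) j = (flushSt (ents, str), "") := by
  unfold stepN flushSt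
  rw [if_neg hj]
  by_cases h : str ≠ ""
  · simp only [if_pos h]
  · simp only [if_neg h]
    rw [not_not] at h
    rw [h]

theorem run1 (labels : List Int) (qi : List String) (m : Nat) : ∀ s (ents : List String) str,
    (∀ j, s ≤ j → j < s + m → labels.getD j 0 = 1) →
    (List.range' s m).foldl (stepN labels qi) (ents, str) = (ents, str ++ catSeg qi s m) := by
  induction m with
  | zero => intro s ents str _; simp [catSeg]
  | succ m ih =>
    intro s ents str h
    rw [List.range'_succ, List.foldl_cons]
    rw [show stepN labels qi (ents, str) s = (ents, str ++ qi.getD s "") from by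
      unfold stepN; rw [if_pos (h s (Nat.le_refl s) (by omega))]]
    rw [ih (s + 1) ents _ (fun j h1 h2 => h j (by omega) (by omega))]
    simp [catSeg, String.append_assoc]

theorem run0 (labels : List Int) (qi : List String) (m : Nat) : ∀ s (ents : List String),
    (∀ j, s ≤ j → j < s + m → labels.getD j 0 ≠ 1) →
    (List.range' s m).foldl (stepN labels qi) (ents, "") = (ents, "") := by
  induction m with
  | zero => intro s ents _; rfl
  | succ m ih =>
    intro s ents h
    rw [List.range'_succ, List.foldl_cons]
    rw [step_flush labels qi ents "" s (h s (Nat.le_refl s) (by omega))]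
    rw [show flushSt (ents, "") = ents from by simp [flushSt]]
    exact ih (s + 1) ents (fun j h1 h2 => h j (by omega) (by omega))

theorem runEnd_le (labels : List Int) (n : Nat) (v : Int) (e : Nat) (he : e ≤ n) :
    runEnd labels n v e ≤ n := by
  rw [runEnd]
  split
  · rename_i h; exact runEnd_le labels n v (e + 1) h.1
  · exact he
termination_by n - e
decreasing_by rename_i h; omega

theorem runEnd_run (labels : List Int) (n : Nat) (v : Int) (e : Nat) :
    ∀ j, e ≤ j → j < runEnd labels n v e → labels.getD j 0 = v := by
  by_cases hc : e < n ∧ labels.getD e 0 = v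
  · rw [runEnd, dif_pos hc]
    intro j hj hlt
    rcases Nat.eq_or_lt_of_le hj with rfl | hgt
    · exact hc.2
    · exact runEnd_run labels n v (e + 1) j hgt hlt
  · rw [runEnd, dif_neg hc]
    intro j hj hlt; omega
termination_by n - e
decreasing_by omega

theorem runEnd_stop (labels : List Int) (n : Nat) (v : Int) (e : Nat)
    (h : runEnd labels n v e < n) : labels.getD (runEnd labels n v e) 0 ≠ v := by
  by_cases hc : e < n ∧ labels.getD e 0 = v
  · rw [runEnd, dif_pos hc] at h ⊢
    exact runEnd_stop labels n v (e + 1) h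
  · rw [runEnd, dif_neg hc] at h ⊢
    intro hv; exact hc ⟨h, hv⟩
termination_by n - e
decreasing_by omega

theorem bLoop_eq (labels : List Int) (qi : List String) (n : Nat) :
    ∀ k s (ents : List String), n - s ≤ k →
    flushSt ((List.range' s (n - s)).foldl (stepN labels qi) (ents, "")) = ents ++ bLoop labels qi n s := by
  intro k
  induction k with
  | zero =>
    intro s ents hk
    rw [show n - s = 0 from by omega, bLoop, dif_neg (by omega : ¬ s < n)]
    simp [flushSt]
  | succ k ih =>
    intro s ents hk
    by_cases hs : s < n
    case neg =>
      rw [Nat.sub_eq_zero_of_le (by omega), bLoop, dif_neg hs]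
      simp [flushSt]
    case pos =>
      have hse : s + 1 ≤ runEnd labels n (labels.getD s 0) s := by
        rw [runEnd, dif_pos ⟨hs, rfl⟩]; exact runEnd_ge labels n _ (s + 1)
      set v := labels.getD s 0 with hv
      set e := runEnd labels n v s with he
      have hen : e ≤ n := runEnd_le labels n v s (by omega)
      have hrun : ∀ j, s ≤ j → j < e → labels.getD j 0 = v := fun j h1 h2 =>
        runEnd_run labels n v s j h1 h2
      have hstop : e < n → labels.getD e 0 ≠ v := fun h => runEnd_stop labels n v s h
      have hsplit : List.range' s (n - s) = List.range' s (e - s) ++ List.range' e (n - e) := by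
        have h2 := @List.range'_append s (e - s) (n - e) 1
        rw [show s + 1 * (e - s) = e from by omega] at h2
        rw [show e - s + (n - e) = n - s from by omega] at h2
        exact h2.symm
      rw [hsplit, List.foldl_append]
      rw [bLoop, dif_pos hs]
      simp only [← hv, ← he]
      by_cases h1 : v = 1
      case pos =>
        rw [if_pos h1]
        rw [run1 labels qi (e - s) s ents "" (fun j hj1 hj2 => by
          rw [hrun j hj1 (by omega)]; exact h1)]
        rw [String.empty_append]
        set S := catSeg qi s (e - s) with hS
        have hSent : S = PySem.Str.join "" (PySem.List.slice qi (some (s : Int)) (some (e : Int))) := by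
          rw [hS, catSeg_eq_join, PySem.List.slice_natCast]
        by_cases hend : e < n
        case pos =>
          have hne1 : labels.getD e 0 ≠ 1 := by rw [← h1]; exact hstop hend
          have hstep2 : ∀ X : List String,
              (List.range' e (n - e)).foldl (stepN labels qi) (X, "") =
              (List.range' (e + 1) (n - e - 1)).foldl (stepN labels qi) (X, "") := by
            intro X
            rw [show n - e = (n - e - 1) + 1 from by omega, List.range'_succ, List.foldl_cons]
            rw [step_flush labels qi X "" e hne1]
            rw [show flushSt (X, "") = X from by simp [flushSt]]
            rw [Nat.add_sub_cancel]
          have hihside := ih e (flushSt (ents, S)) (by omega)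
          rw [hstep2] at hihside
          rw [show n - e = (n - e - 1) + 1 from by omega, List.range'_succ, List.foldl_cons]
          rw [step_flush labels qi ents S e hne1]
          rw [hihside]
          rw [hSent]
          by_cases hE : PySem.Str.join "" (PySem.List.slice qi (some (s : Int)) (some (e : Int))) = ""
          · simp [flushSt, hE]
          · simp [flushSt, hE]
        case neg =>
          have hEn : e = n := by omega
          rw [hEn, Nat.sub_self]
          rw [show bLoop labels qi n n = [] from by rw [bLoop, dif_neg (by omega : ¬ n < n)]]
          rw [hSent, ← hEn]
          simp only [flushSt]
          by_cases hE : PySem.Str.join "" (PySem.List.slice qi (some (s : Int)) (some (e : Int))) = ""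
          · simp [hE]
          · simp [hE]
      case neg =>
        rw [if_neg h1]
        rw [run0 labels qi (e - s) s ents (fun j hj1 hj2 => by
          rw [hrun j hj1 (by omega)]; exact h1)]
        exact ih e ents (by omega)

theorem innerA_eq (labels : List Int) (qi : List String) (n : Nat) :
    ((PySem.List.pyRange 0 (n : Int) 1).foldl
      (fun (st : List String × String) j =>
        if PySem.List.pyGetD labels j 0 = 1 then (st.1, st.2 ++ PySem.List.pyGetD qi j "")
        else if st.2 ≠ "" then (st.1 ++ [st.2], "") else st) ([], ""))
    = (List.range' 0 n).foldl (stepN labels qi) ([], "") := by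
  rw [PySem.List.pyRange_one, List.foldl_map]
  rw [show ((n : Int) - 0).toNat = n from by omega]
  rw [List.range_eq_range']
  have hf : (fun (st : List String × String) (k : Nat) =>
      if PySem.List.pyGetD labels ((0 : Int) + (k : Int)) 0 = 1 then
        (st.1, st.2 ++ PySem.List.pyGetD qi ((0 : Int) + (k : Int)) "")
      else if st.2 ≠ "" then (st.1 ++ [st.2], "") else st) = stepN labels qi := by
    funext st k
    simp [stepN]
  rw [hf]

theorem ports_agree (pred : List (List Int)) (question : List (List String)) :
    restore_entities pred question = restore_entities_alt pred question := by
  rw [restore_entities, restore_entities_alt,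
    PySem.List.enumerate_eq_map_pyRange pred ([] : List Int)]
  rw [show PySem.List.len pred = (pred.length : Int) from by simp [PySem.List.len]]
  rw [PySem.List.pyRange_one, List.foldl_map, List.map_map, List.map_map]
  rw [show ((pred.length : Int) - 0).toNat = pred.length from by omega]
  rw [PySem.List.foldl_append_singleton_eq_map]
  rw [List.nil_append]
  apply List.map_congr_left
  intro k hk
  simp only [Function.comp, zero_add]
  rw [innerA_eq]
  have hb := bLoop_eq (PySem.List.slice (PySem.List.pyGetD pred (k : Int) []) (some 1) (some (-1)))
      (PySem.List.pyGetD question (k : Int) ([] : List String))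
      (min (PySem.List.slice (PySem.List.pyGetD pred (k : Int) []) (some 1) (some (-1))).length question.length)
      (min (PySem.List.slice (PySem.List.pyGetD pred (k : Int) []) (some 1) (some (-1))).length question.length)
      0 [] (by omega)
  rw [Nat.sub_zero, List.nil_append] at hb
  exact hb

-- ===== VERDICT (by name: the statement is the Claim_ definition above) =====
theorem restore_entities_spec : Claim_equal_restore_entities := by
  intro pred question _ _
  unfold Spec_restore_entities
  exact ports_agree pred question
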